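-- pv_equiv track=rewrite | github.com/BIH-CEI/rarelink | src/rarelink/utils/processing/codes/fetch_displays.py | preprocess_code
-- ===== SOURCE A (Python) =====
-- def preprocess_code(code: str) -> str:
--     """
--     Preprocess code string to standard format (with colon separator).
--
--     Args:
--         code (str): Code to process (e.g., "mondo_0007843")
--
--     Returns:
--         str: Processed code (e.g., "MONDO:0007843")
--     """
--     if not code:
--         return None
--
--     # Handle prefixes without colon
--     prefixes = {
--         "mondo_": "MONDO:",
--         "hp_": "HP:",
--         "ncit_": "NCIT:",
--         "snomedct_": "SNOMEDCT:",
--         "orpha_": "ORPHA:",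
--         "omim_": "OMIM:",
--         "icd10_": "ICD10:",
--         "icd11_": "ICD11:",
--         "loinc_": "LOINC:"
--     }
--
--     # Handle with or without colon
--     if ":" in code:
--         # Already has a colon, just uppercase prefix
--         prefix, rest = code.split(":", 1)
--         return f"{prefix.upper()}:{rest}"
--
--     # Check for underscores
--     for prefix, replacement in prefixes.items():
--         if code.lower().startswith(prefix):
--             return f"{replacement}{code[len(prefix):]}"
--
--     return code  # Return original if no match
-- ===== SOURCE B (Python) =====
-- _KNOWN = {"mondo", "hp", "ncit", "snomedct", "orpha", "omim", "icd10", "icd11", "loinc"}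
--
--
-- def preprocess_code(code: str) -> str:
--     if not code:
--         return None
--     head, sep, rest = code.partition(":")
--     if sep:
--         return f"{head.upper()}:{rest}"
--     head, sep, rest = code.partition("_")
--     if sep and head.lower() in _KNOWN:
--         return f"{head.upper()}:{rest}"
--     return code
-- ===== Notes on version B (the rewrite author's own statement) =====
-- stated objective: simpler
-- what changed: Replaces A's colon containment test + split and the nine-entry prefix dict with its startswith loop by two str.partition calls (first at the colon, then at the underscore) and a set membership test on the lowered head, rebuilding the result from head.upper() and the tail.
import Mathlib
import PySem

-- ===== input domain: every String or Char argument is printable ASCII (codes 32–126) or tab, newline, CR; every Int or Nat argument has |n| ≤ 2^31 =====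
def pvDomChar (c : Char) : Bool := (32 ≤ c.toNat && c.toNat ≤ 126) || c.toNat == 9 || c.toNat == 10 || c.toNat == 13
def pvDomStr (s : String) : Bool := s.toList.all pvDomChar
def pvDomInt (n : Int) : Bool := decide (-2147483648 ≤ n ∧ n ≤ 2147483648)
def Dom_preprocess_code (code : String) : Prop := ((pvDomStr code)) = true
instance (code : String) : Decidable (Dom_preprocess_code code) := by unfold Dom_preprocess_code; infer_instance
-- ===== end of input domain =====

-- B replaces A's colon containment test + split and the nine-entry prefix→replacement dict with
-- its startswith loop by two partitions (at the first colon / underscore) plus a set lookup on the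
-- lowered head (objective: simpler).

-- ===== PORT A =====
-- the `prefixes` dict of A, in insertion order
def pvPrefixesA : List (String × String) :=
  [("mondo_", "MONDO:"), ("hp_", "HP:"), ("ncit_", "NCIT:"), ("snomedct_", "SNOMEDCT:"),
   ("orpha_", "ORPHA:"), ("omim_", "OMIM:"), ("icd10_", "ICD10:"), ("icd11_", "ICD11:"),
   ("loinc_", "LOINC:")]

-- A's `for prefix, replacement in prefixes.items(): if code.lower().startswith(prefix): return …`
def pvLoopA (code : String) : List (String × String) → Option String
  | [] => none
  | (p, r) :: rest =>
      if PySem.Str.startswith (PySem.Str.lower code) p then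
        some (r ++ PySem.Str.slice code (some (PySem.Str.len p)) none)
      else pvLoopA code rest

def preprocess_code (code : String) : Option String :=
  if code = "" then none
  else if PySem.Str.isIn ":" code then
    match (PySem.Str.splitMax? code ":" 1).getD [] with
    | pfx :: rest :: _ => some (PySem.Str.upper pfx ++ ":" ++ rest)
    | _ => none   -- unreachable: split(":", 1) with ":" present yields exactly two pieces
  else
    match pvLoopA code pvPrefixesA with
    | some r => some r
    | none => some code

-- ===== PORT B =====
def pvKnownB : PySem.Set String :=
  PySem.Set.ofList ["mondo", "hp", "ncit", "snomedct", "orpha", "omim", "icd10", "icd11", "loinc"]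

-- s.partition(sep) for a one-character separator, ported by hand (no PySem primitive); exact:
-- head = chars before the first sep, the separator-found flag, rest = chars after it
-- ("" and False when sep does not occur)
def pvPartition (sep : Char) (s : String) : String × Bool × String :=
  let L := s.toList
  let h := L.takeWhile (fun c => c != sep)
  if h.length = L.length then (s, false, "")
  else (String.ofList h, true, String.ofList (L.drop (h.length + 1)))

def preprocess_code_alt (code : String) : Option String :=
  if code = "" then none
  else
    match pvPartition ':' code with
    | (h1, s1, r1) =>
        if s1 then some (PySem.Str.upper h1 ++ ":" ++ r1)
        else
          match pvPartition '_' code with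
          | (h2, s2, r2) =>
              if s2 && PySem.Set.contains pvKnownB (PySem.Str.lower h2) then
                some (PySem.Str.upper h2 ++ ":" ++ r2)
              else some code

-- ===== PRECONDITION & SPEC =====
def Spec_preprocess_code (code : String) (out : Option String) : Prop := out = preprocess_code_alt code
instance (code : String) (out : Option String) : Decidable (Spec_preprocess_code code out) := by unfold Spec_preprocess_code; infer_instance

-- ===== CLAIM (what is proved, stated in full; the proofs are below) =====
def Claim_equal_preprocess_code : Prop := ∀ (code : String), Dom_preprocess_code code → Spec_preprocess_code code (preprocess_code code)

-- ===== LEMMAS AND PROOFS =====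
lemma pvCharEqN (a b : Char) : a = b ↔ a.toNat = b.toNat :=
  ⟨fun h => h ▸ rfl, fun h => Char.ext (UInt32.toNat_inj.mp h)⟩

lemma pvCharLe (a b : Char) : a ≤ b ↔ a.toNat ≤ b.toNat := by
  rw [Char.le_def]; exact UInt32.le_iff_toNat_le

lemma pvLowN (c : Char) : (PySem.Chars.lowerChar c).toNat = if 65 ≤ c.toNat ∧ c.toNat ≤ 90 then c.toNat + 32 else c.toNat := by
  have hA : ('A').toNat = 65 := by decide
  have hZ : ('Z').toNat = 90 := by decide
  unfold PySem.Chars.lowerChar PySem.Chars.isupper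
  simp only [pvCharLe, Bool.and_eq_true, decide_eq_true_eq, hA, hZ] at *
  split_ifs with h h2 <;> first
  | rfl
  | (rw [Char.toNat_ofNat]; simp [Nat.isValidChar]; omega)
  | omega

lemma pvUpN (c : Char) : (PySem.Chars.upperChar c).toNat = if 97 ≤ c.toNat ∧ c.toNat ≤ 122 then c.toNat - 32 else c.toNat := by
  have ha : ('a').toNat = 97 := by decide
  have hz : ('z').toNat = 122 := by decide
  unfold PySem.Chars.upperChar PySem.Chars.islower
  simp only [pvCharLe, Bool.and_eq_true, decide_eq_true_eq, ha, hz] at *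
  split_ifs with h h2 <;> first
  | rfl
  | (rw [Char.toNat_ofNat]; simp [Nat.isValidChar]; omega)
  | omega

lemma pvLowUs (c : Char) : (PySem.Chars.lowerChar c = '_') ↔ c = '_' := by
  rw [pvCharEqN, pvCharEqN, pvLowN]
  have : ('_').toNat = 95 := by decide
  split_ifs with h <;> omega

lemma pvUpLow (c : Char) : PySem.Chars.upperChar (PySem.Chars.lowerChar c) = PySem.Chars.upperChar c := by
  rw [pvCharEqN, pvUpN, pvUpN, pvLowN]
  split_ifs <;> omega

lemma pvUpLowL (l : List Char) : PySem.Chars.upper (PySem.Chars.lower l) = PySem.Chars.upper l := by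
  simp [PySem.Chars.upper, PySem.Chars.lower, Function.comp, pvUpLow]

lemma pvLowBne (c : Char) : (PySem.Chars.lowerChar c != '_') = (c != '_') := by
  by_cases h : c = '_' <;> simp [bne, pvLowUs, h]

lemma pvLowerTakeWhile (M : List Char) :
    (PySem.Chars.lower M).takeWhile (fun c => c != '_') =
      PySem.Chars.lower (M.takeWhile (fun c => c != '_')) := by
  unfold PySem.Chars.lower
  rw [List.takeWhile_map]
  have hpred : ((fun c => c != '_') ∘ PySem.Chars.lowerChar) = (fun c : Char => c != '_') :=
    funext fun c => pvLowBne c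
  rw [hpred]

lemma pvLengthLower (M : List Char) : (PySem.Chars.lower M).length = M.length := by
  simp [PySem.Chars.lower]

-- p ++ ['_'] is a prefix of M iff the chars of M before its first '_' are exactly p
lemma pvPrefixIff (p M : List Char) (hp : '_' ∉ p) :
    p ++ ['_'] <+: M ↔ (M.takeWhile (fun c => c != '_') = p ∧ p.length < M.length) := by
  induction p generalizing M with
  | nil =>
    cases M with
    | nil => simp
    | cons c M' =>
      rw [List.takeWhile_cons]
      by_cases hc : c = '_'
      · subst hc
        simp [List.cons_prefix_cons]
      · simp [List.cons_prefix_cons, hc,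
          (show ('_' = c) ↔ False from ⟨fun h => hc h.symm, False.elim⟩)]
  | cons a p' ih =>
    have ha : a ≠ '_' := fun h => hp (h ▸ List.mem_cons_self)
    have hp' : '_' ∉ p' := fun h => hp (List.mem_cons_of_mem _ h)
    cases M with
    | nil => simp
    | cons c M' =>
      by_cases hc : c = '_'
      · subst hc
        rw [List.takeWhile_cons]
        simp [List.cons_prefix_cons,
          (show (a = '_') ↔ False from ⟨fun h => ha h, False.elim⟩)]
      · simp only [List.cons_append, List.cons_prefix_cons, List.takeWhile_cons]
        rw [if_pos (show (c != '_') = true by simp [bne, hc])]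
        constructor
        · rintro ⟨rfl, hpre⟩
          have := (ih M' hp').mp hpre
          simp [this.1, this.2]
        · rintro ⟨h1, h2⟩
          have hcons := h1
          simp only [List.cons.injEq] at hcons
          refine ⟨hcons.1.symm, (ih M' hp').mpr ⟨hcons.2, by simp at h2 ⊢; omega⟩⟩

lemma pvTakeWhileLenLe (c : Char) (M : List Char) :
    (M.takeWhile (fun x => x != c)).length ≤ M.length := by
  induction M with
  | nil => simp
  | cons x M ih =>
    rw [List.takeWhile_cons]
    by_cases hx : (x != c) = true
    · rw [if_pos hx]; simpa using ih
    · rw [if_neg hx]; simp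

lemma pvMemIffLt (c : Char) (l : List Char) :
    c ∈ l ↔ (l.takeWhile (fun x => x != c)).length < l.length := by
  induction l with
  | nil => simp
  | cons x r ih =>
    rw [List.takeWhile_cons]
    by_cases hx : x = c
    · subst hx
      simp [bne]
    · rw [if_pos (show (x != c) = true by simp [bne, hx])]
      simp only [List.mem_cons, List.length_cons]
      constructor
      · rintro (h | h)
        · exact absurd h.symm hx
        · have := ih.mp h; omega
      · intro h
        exact Or.inr (ih.mpr (by omega))

-- one step of PySem.Chars.splitOnMax.go once the split budget is exhausted
lemma pvGo0 (c : Char) (fuel : Nat) (l : List Char) (acc : List (List Char)) :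
    PySem.Chars.splitOnMax.go [c] fuel 0 l [] acc = (l :: acc).reverse := by
  cases fuel with
  | zero => simp [PySem.Chars.splitOnMax.go]
  | succ f => cases l with
    | nil => simp [PySem.Chars.splitOnMax.go]
    | cons h r => simp [PySem.Chars.splitOnMax.go]

-- PySem.Chars.splitOnMax.go on a one-character separator with maxsplit 1: split at the first
-- occurrence of the separator
lemma pvGo1 (c : Char) : ∀ (fuel : Nat) (l cur : List Char) (acc : List (List Char)),
    l.length < fuel →
    PySem.Chars.splitOnMax.go [c] fuel 1 l cur acc =
      (if c ∈ l
       then (l.drop ((l.takeWhile (fun x => x != c)).length + 1) ::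
             (cur.reverse ++ l.takeWhile (fun x => x != c)) :: acc)
       else ((cur.reverse ++ l) :: acc)).reverse := by
  intro fuel
  induction fuel with
  | zero => intro l cur acc h; omega
  | succ f ih =>
    intro l cur acc h
    cases l with
    | nil => simp [PySem.Chars.splitOnMax.go]
    | cons x rest =>
      by_cases hx : x = c
      · subst hx
        have hpre : [x].isPrefixOf (x :: rest) = true := by simp [List.isPrefixOf]
        simp only [PySem.Chars.splitOnMax.go, hpre, if_true]
        rw [pvGo0]
        simp [List.takeWhile_cons]
      · have hpre : [c].isPrefixOf (x :: rest) = false := by simp [List.isPrefixOf, Ne.symm hx]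
        simp only [PySem.Chars.splitOnMax.go, hpre]
        rw [ih rest (x :: cur) acc (by simp at h ⊢; omega)]
        by_cases hm : c ∈ rest
        · simp [hm, hx, Ne.symm hx, List.append_assoc]
        · simp [hm, hx, Ne.symm hx, List.append_assoc]

lemma pvIsInColon (code : String) : PySem.Str.isIn ":" code = true ↔ ':' ∈ code.toList := by
  rw [PySem.Str.isIn_iff_infix]
  have : (":" : String).toList = [':'] := by decide
  rw [this]
  constructor
  · intro h; exact h.mem (by simp)
  · intro h
    obtain ⟨s, t, hst⟩ := List.append_of_mem h
    exact ⟨s, t, by rw [hst]; simp⟩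

-- code.split(":", 1) when ':' occurs in code: the chars before the first ':' and those after it
lemma pvSplitColon (code : String) (h : ':' ∈ code.toList) :
    PySem.Str.splitMax? code ":" 1 =
      some [String.ofList (code.toList.takeWhile (fun x => x != ':')),
            String.ofList (code.toList.drop
              ((code.toList.takeWhile (fun x => x != ':')).length + 1))] := by
  unfold PySem.Str.splitMax? PySem.Chars.splitMax? PySem.Chars.splitOnMax
  have hsep : (":" : String).toList = [':'] := by decide
  rw [hsep]
  norm_num
  rw [pvGo1 ':' (code.length + 1) code.toList [] [] (by simp)]
  simp [h]

-- A's loop over a list of (name ++ "_", upper name ++ ":") pairs, characterised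
lemma pvLoopEq (code : String) (ns : List String) (hns : ∀ n ∈ ns, '_' ∉ n.toList) :
    pvLoopA code (ns.map (fun n => (n ++ "_", PySem.Str.upper n ++ ":"))) =
      (let t := code.toList.takeWhile (fun c => c != '_')
       if t.length < code.toList.length ∧ String.ofList (PySem.Chars.lower t) ∈ ns
       then some (String.ofList (PySem.Chars.upper t) ++ ":" ++
                  String.ofList (code.toList.drop (t.length + 1)))
       else none) := by
  induction ns with
  | nil => simp [pvLoopA]
  | cons n ns ih =>
    have hn : '_' ∉ n.toList := hns n List.mem_cons_self
    have hns' : ∀ m ∈ ns, '_' ∉ m.toList := fun m hm => hns m (List.mem_cons_of_mem _ hm)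
    set L := code.toList with hL
    set t := L.takeWhile (fun c => c != '_') with ht
    have hcond : PySem.Str.startswith (PySem.Str.lower code) (n ++ "_") = true ↔
        (PySem.Chars.lower t = n.toList ∧ n.toList.length < L.length) := by
      rw [PySem.Str.startswith_eq, PySem.Chars.startswith_iff, PySem.Str.toList_lower]
      have : (n ++ ("_" : String)).toList = n.toList ++ ['_'] := by
        rw [String.toList_append]; rfl
      rw [this, pvPrefixIff _ _ hn, pvLowerTakeWhile, pvLengthLower, ← hL]
    simp only [List.map_cons, pvLoopA]
    by_cases hc : PySem.Str.startswith (PySem.Str.lower code) (n ++ "_") = true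
    · rw [if_pos hc]
      obtain ⟨hlt, hlen⟩ := hcond.mp hc
      have htlen : t.length = n.toList.length := by
        rw [← pvLengthLower t, hlt]
      have hcnd : t.length < L.length ∧ String.ofList (PySem.Chars.lower t) ∈ n :: ns := by
        refine ⟨by omega, ?_⟩
        rw [hlt, String.ofList_toList]; exact List.mem_cons_self
      simp only [if_pos hcnd]
      congr 1
      apply String.toList_inj.mp
      simp only [String.toList_append, String.toList_ofList, PySem.Str.toList_upper,
        PySem.Str.toList_slice, PySem.Chars.slice_eq_listSlice]
      have hlen2 : PySem.Str.len (n ++ "_") = ((n.toList.length + 1 : Nat) : Int) := by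
        simp [PySem.Str.len, String.toList_append]
      rw [hlen2, PySem.List.slice_from_natCast]
      rw [← pvUpLowL t, hlt, htlen]
    · rw [if_neg hc, ih hns']
      by_cases hsep : t.length < L.length ∧ String.ofList (PySem.Chars.lower t) ∈ ns
      · rw [if_pos hsep, if_pos ⟨hsep.1, List.mem_cons_of_mem _ hsep.2⟩]
      · rw [if_neg hsep]
        rw [if_neg ?_]
        rintro ⟨h1, h2⟩
        rcases List.mem_cons.mp h2 with h3 | h3
        · apply hc
          apply hcond.mpr
          have : PySem.Chars.lower t = n.toList := by
            rw [← String.toList_ofList (l := PySem.Chars.lower t), h3]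
          refine ⟨this, ?_⟩
          have : n.toList.length = t.length := by rw [← this, pvLengthLower]
          omega
        · exact hsep ⟨h1, h3⟩

lemma pvNamesEq : pvPrefixesA =
    (["mondo", "hp", "ncit", "snomedct", "orpha", "omim", "icd10", "icd11", "loinc"] : List String).map
      (fun n => (n ++ "_", PySem.Str.upper n ++ ":")) := by decide

-- A's prefix loop agrees with B's underscore partition + set lookup
lemma pvBranch (code : String) :
    (match pvLoopA code pvPrefixesA with
     | some r => some r
     | none => some code) =
    (match pvPartition '_' code with
     | (h, sep, rest) =>
         if sep && PySem.Set.contains pvKnownB (PySem.Str.lower h) then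
           some (PySem.Str.upper h ++ ":" ++ rest)
         else some code) := by
  rw [pvNamesEq, pvLoopEq code _ (by decide)]
  set L := code.toList with hL
  set t := L.takeWhile (fun c => c != '_') with ht
  have hpart : pvPartition '_' code =
      (if t.length = L.length then (code, false, "")
       else (String.ofList t, true, String.ofList (L.drop (t.length + 1)))) := by
    unfold pvPartition
    rfl
  rw [hpart]
  by_cases hlen : t.length = L.length
  · rw [if_pos hlen, if_neg (fun hco => absurd hco.1 (by omega))]
    rfl
  · rw [if_neg hlen]
    have hlt : t.length < L.length := lt_of_le_of_ne (pvTakeWhileLenLe '_' L) hlen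
    have hlow : PySem.Str.lower (String.ofList t) = String.ofList (PySem.Chars.lower t) :=
      String.toList_inj.mp (by simp [PySem.Str.toList_lower])
    have hup : PySem.Str.upper (String.ofList t) = String.ofList (PySem.Chars.upper t) :=
      String.toList_inj.mp (by simp [PySem.Str.toList_upper])
    have hmem : PySem.Set.contains pvKnownB (PySem.Str.lower (String.ofList t)) =
        decide (String.ofList (PySem.Chars.lower t) ∈
          (["mondo", "hp", "ncit", "snomedct", "orpha", "omim", "icd10", "icd11", "loinc"] : List String)) := by
      rw [hlow, pvKnownB, Bool.eq_iff_iff]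
      simp [PySem.Set.mem_ofList]
    by_cases hm : String.ofList (PySem.Chars.lower t) ∈
        (["mondo", "hp", "ncit", "snomedct", "orpha", "omim", "icd10", "icd11", "loinc"] : List String)
    · rw [if_pos ⟨hlt, hm⟩]
      have hctrue : PySem.Set.contains pvKnownB (PySem.Str.lower (String.ofList t)) = true := by
        rw [hmem]; simpa using hm
      simp only [Bool.true_and, hctrue, if_true, hup]
    · have hcfalse : PySem.Set.contains pvKnownB (PySem.Str.lower (String.ofList t)) = false := by
        rw [hmem]; simpa using hm
      rw [if_neg (fun hco => hm hco.2)]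
      simp only [Bool.true_and, hcfalse, Bool.false_eq_true, if_false]

-- ===== VERDICT (by name: the statement is the Claim_ definition above) =====
theorem preprocess_code_spec : Claim_equal_preprocess_code := by
  intro code _
  unfold Spec_preprocess_code preprocess_code preprocess_code_alt
  by_cases h0 : code = ""
  · simp [h0]
  · rw [if_neg h0, if_neg h0]
    set L := code.toList with hL
    set t := L.takeWhile (fun x => x != ':') with ht
    have hpartc : pvPartition ':' code =
        (if t.length = L.length then (code, false, "")
         else (String.ofList t, true, String.ofList (L.drop (t.length + 1)))) := by
      unfold pvPartition
      rfl
    rw [hpartc]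
    by_cases hc : ':' ∈ L
    · have hlt : t.length < L.length := (pvMemIffLt ':' L).mp hc
      rw [if_pos ((pvIsInColon code).mpr hc), if_neg (by omega)]
      rw [pvSplitColon code hc]
      simp only [Option.getD_some, ← hL, ← ht, if_true]
    · have hne : PySem.Str.isIn ":" code ≠ true := fun hh => hc ((pvIsInColon code).mp hh)
      have hlen : t.length = L.length := by
        have h1 : t.length ≤ L.length := by rw [ht]; exact pvTakeWhileLenLe ':' L
        have h2 : ¬ (t.length < L.length) := fun hh => hc ((pvMemIffLt ':' L).mpr hh)
        omega
      rw [if_neg hne, if_pos hlen]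
      simp only [Bool.false_eq_true, if_false]
      exact pvBranch code
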